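-- pv_equiv track=rewrite | github.com/daaaaaayoon/Algorithm | src/boj/Boj_4659.py | check_3vowel_3con
-- ===== SOURCE A (Python) =====
-- def check_3vowel_3con(string):
--     if len(string)<3:
--         return True
--     elif len(string)==3:
--         check = ''
--         for i in range(3):
--             if string[i] in 'aeiou':
--                 check += 'v'
--             else:
--                 check += 'c'
--         if check == 'vvv' or check == 'ccc':
--             return False
--         else:
--             return True
--     for i in range(len(string)-2):
--         check = ''
--         for j in range(3):
--             if string[i+j] in 'aeiou':
--                 check += 'v'
--             else:
--                 check += 'c'
--         if check == 'vvv' or check == 'ccc':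
--             return False
--     return True
-- ===== SOURCE B (Python) =====
-- def check_3vowel_3con(string):
--     prev = None
--     run = 0
--     for ch in string:
--         t = ch in 'aeiou'
--         if prev is not None and t == prev:
--             run += 1
--         else:
--             run = 1
--         if run == 3:
--             return False
--         prev = t
--     return True
-- ===== Notes on version B (the rewrite author's own statement) =====
-- stated objective: simpler
-- what changed: Replaced the windowed re-scan (rebuilding a 3-char class string for every index, plus a special-cased len==3 branch) by a single forward pass maintaining the previous character's vowel/consonant class and the length of the current same-class run, returning False as soon as the run reaches 3.
import Mathlib
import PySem

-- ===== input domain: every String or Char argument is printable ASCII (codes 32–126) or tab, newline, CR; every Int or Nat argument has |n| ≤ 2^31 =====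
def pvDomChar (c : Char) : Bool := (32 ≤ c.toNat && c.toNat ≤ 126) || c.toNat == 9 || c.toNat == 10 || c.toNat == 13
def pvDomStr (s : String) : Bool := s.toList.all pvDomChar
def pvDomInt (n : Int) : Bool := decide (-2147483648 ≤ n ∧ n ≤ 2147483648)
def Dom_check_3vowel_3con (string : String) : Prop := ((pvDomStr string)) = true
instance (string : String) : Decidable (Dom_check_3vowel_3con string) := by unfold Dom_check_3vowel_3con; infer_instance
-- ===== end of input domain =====

-- B replaces A's per-index 3-char window rebuild (and its special len==3 branch) by a single
-- forward pass keeping the previous character's class and the current same-class run length (objective: simpler).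

-- ===== PORT A =====
-- string[i] in 'aeiou'
def pvVowA (c : Char) : Bool := ['a', 'e', 'i', 'o', 'u'].contains c

-- inner loop: check = ''; for j in range(3): check += 'v' / 'c'
-- (the Python str `check` is represented as a List Char; exact, it only ever holds ASCII 'v'/'c')
def pvCheckA (cs : List Char) (i : Int) : List Char :=
  (PySem.List.pyRange 0 3 1).foldl
    (fun check j => check ++ [if pvVowA (PySem.List.pyGetD cs (i + j) ' ') then 'v' else 'c']) []

-- outer loop with its early `return False`
def pvLoopA (cs : List Char) : List Int → Bool
  | [] => true
  | i :: rest =>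
      let check := pvCheckA cs i
      if check = ['v', 'v', 'v'] ∨ check = ['c', 'c', 'c'] then false else pvLoopA cs rest

def check_3vowel_3con (string : String) : Bool :=
  let cs := string.toList
  if cs.length < 3 then true
  else if cs.length = 3 then
    let check := pvCheckA cs 0
    if check = ['v', 'v', 'v'] ∨ check = ['c', 'c', 'c'] then false else true
  else pvLoopA cs (PySem.List.pyRange 0 ((cs.length : Int) - 2) 1)

-- ===== PORT B =====
-- ch in 'aeiou'
def pvVowB (c : Char) : Bool := ['a', 'e', 'i', 'o', 'u'].contains c

-- the single pass: prev = class of the previous char (none before the first), run = current run length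
def pvLoopB (prev : Option Bool) (run : Int) : List Char → Bool
  | [] => true
  | c :: rest =>
      let t := pvVowB c
      let run' : Int := if prev = some t then run + 1 else 1
      if run' = 3 then false else pvLoopB (some t) run' rest

def check_3vowel_3con_alt (string : String) : Bool :=
  pvLoopB none 0 string.toList

-- ===== PRECONDITION & SPEC =====
def Spec_check_3vowel_3con (string : String) (out : Bool) : Prop := out = check_3vowel_3con_alt string
instance (string : String) (out : Bool) : Decidable (Spec_check_3vowel_3con string out) := by unfold Spec_check_3vowel_3con; infer_instance

-- ===== CLAIM (what is proved, stated in full; the proofs are below) =====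
def Claim_equal_check_3vowel_3con : Prop := ∀ (string : String), Dom_check_3vowel_3con string → Spec_check_3vowel_3con string (check_3vowel_3con string)

-- ===== LEMMAS AND PROOFS =====

-- reference predicate both ports are reduced to: no 3 consecutive chars of equal class
def pvChk : List Char → Bool
  | a :: b :: c :: t =>
      if pvVowA a = pvVowA b ∧ pvVowA b = pvVowA c then false else pvChk (b :: c :: t)
  | _ => true

theorem pvVowB_eq_A : pvVowB = pvVowA := rfl

theorem pvChk_cons_ne (x y : Char) (t : List Char) (h : pvVowA x ≠ pvVowA y) :
    pvChk (x :: y :: t) = pvChk (y :: t) := by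
  cases t with
  | nil => rfl
  | cons z r => simp [pvChk, h]

-- ---- B side ----
theorem pvLoopB_state (l : List Char) :
    (∀ a : Char, pvLoopB (some (pvVowA a)) 1 l = pvChk (a :: l)) ∧
    (∀ a b : Char, pvVowA a = pvVowA b →
      pvLoopB (some (pvVowA b)) 2 l = pvChk (a :: b :: l)) := by
  induction l with
  | nil => exact ⟨fun a => rfl, fun a b _ => rfl⟩
  | cons x r ih =>
    constructor
    · intro a
      by_cases h : pvVowA a = pvVowA x
      · simp only [pvLoopB, pvVowB_eq_A, h]
        simpa using ih.2 a x h
      · have hx : ¬ (some (pvVowA a) = some (pvVowA x)) := by simpa using h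
        simp only [pvLoopB, pvVowB_eq_A, if_neg hx]
        norm_num
        rw [ih.1 x, pvChk_cons_ne a x r h]
    · intro a b hab
      by_cases h : pvVowA b = pvVowA x
      · simp [pvLoopB, pvVowB_eq_A, h, pvChk, hab]
      · have hx : ¬ (some (pvVowA b) = some (pvVowA x)) := by simpa using h
        simp only [pvLoopB, pvVowB_eq_A, if_neg hx]
        norm_num
        have hred : pvChk (a :: b :: x :: r) = pvChk (b :: x :: r) := by simp [pvChk, h]
        rw [ih.1 x, hred, pvChk_cons_ne b x r h]

theorem alt_eq_chk (cs : List Char) : pvLoopB none 0 cs = pvChk cs := by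
  cases cs with
  | nil => rfl
  | cons c r =>
    simp only [pvLoopB, pvVowB_eq_A]
    norm_num
    exact (pvLoopB_state r).1 c

-- ---- A side ----
-- the window at i, evaluated
theorem pvCheckA_eval (cs : List Char) (i : Int) :
    pvCheckA cs i =
      [if pvVowA (PySem.List.pyGetD cs i ' ') then 'v' else 'c',
       if pvVowA (PySem.List.pyGetD cs (i + 1) ' ') then 'v' else 'c',
       if pvVowA (PySem.List.pyGetD cs (i + 2) ' ') then 'v' else 'c'] := by
  have h3 : PySem.List.pyRange 0 3 1 = [0, 1, 2] := by decide
  simp [pvCheckA, h3]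

-- the window condition at i is the class-equality condition
theorem pvWindow_cond (x y z : Bool) :
    ([if x then 'v' else 'c', if y then 'v' else 'c', if z then 'v' else 'c'] = ['v','v','v'] ∨
     [if x then 'v' else 'c', if y then 'v' else 'c', if z then 'v' else 'c'] = ['c','c','c'])
    ↔ (x = y ∧ y = z) := by
  cases x <;> cases y <;> cases z <;> simp

theorem pyGetD_cons_shift (a : Char) (cs : List Char) (i : Int) (hi : 0 ≤ i) (d : Char) :
    PySem.List.pyGetD (a :: cs) (i + 1) d = PySem.List.pyGetD cs i d := by
  obtain ⟨n, rfl⟩ := Int.eq_ofNat_of_zero_le hi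
  have : ((n : Int) + 1) = ((n + 1 : Nat) : Int) := by push_cast; ring
  rw [this, PySem.List.pyGetD_natCast, PySem.List.pyGetD_natCast]
  simp

theorem pvCheckA_shift (a : Char) (cs : List Char) (i : Int) (hi : 0 ≤ i) :
    pvCheckA (a :: cs) (i + 1) = pvCheckA cs i := by
  rw [pvCheckA_eval, pvCheckA_eval]
  have e1 : i + 1 + 1 = (i + 1) + 1 := by ring
  have e2 : i + 1 + 2 = (i + 2) + 1 := by ring
  rw [e1, e2, pyGetD_cons_shift a cs i hi, pyGetD_cons_shift a cs (i + 1) (by omega),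
      pyGetD_cons_shift a cs (i + 2) (by omega)]

-- shift the whole outer loop by one position
theorem pvLoopA_shift (a : Char) (cs : List Char) (k m : Int) (hk : 0 ≤ k) :
    pvLoopA (a :: cs) (PySem.List.pyRange (k + 1) (m + 1) 1) =
    pvLoopA cs (PySem.List.pyRange k m 1) := by
  by_cases h : k < m
  · rw [PySem.List.pyRange_one_cons (by omega), PySem.List.pyRange_one_cons h]
    simp only [pvLoopA]
    rw [pvCheckA_shift a cs k hk]
    split
    · rfl
    · have e : k + 1 + 1 = (k + 1) + 1 := by ring
      rw [e]
      exact pvLoopA_shift a cs (k + 1) m (by omega)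
  · rw [PySem.List.pyRange_one_eq_nil (by omega), PySem.List.pyRange_one_eq_nil (by omega)]
    rfl
termination_by (m - k).toNat
decreasing_by omega

theorem pvLoopA_step (a b c : Char) (t : List Char) :
    pvLoopA (a :: b :: c :: t) (PySem.List.pyRange 0 ((t.length : Int) + 1) 1) =
      if pvVowA a = pvVowA b ∧ pvVowA b = pvVowA c then false
      else pvLoopA (b :: c :: t) (PySem.List.pyRange 0 (t.length : Int) 1) := by
  rw [PySem.List.pyRange_one_cons (by omega)]
  simp only [pvLoopA]
  have hw : pvCheckA (a :: b :: c :: t) 0 =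
      [if pvVowA a then 'v' else 'c', if pvVowA b then 'v' else 'c',
       if pvVowA c then 'v' else 'c'] := by
    rw [pvCheckA_eval]
    norm_num [PySem.List.pyGetD_zero_cons]
    constructor
    · have : (1 : Int) = ((1 : Nat) : Int) := rfl
      rw [this, PySem.List.pyGetD_natCast]; rfl
    · have : (2 : Int) = ((2 : Nat) : Int) := rfl
      rw [this, PySem.List.pyGetD_natCast]; rfl
  rw [hw]
  by_cases hcond : pvVowA a = pvVowA b ∧ pvVowA b = pvVowA c
  · rw [if_pos ((pvWindow_cond _ _ _).mpr hcond), if_pos hcond]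
  · rw [if_neg (fun hc => hcond ((pvWindow_cond _ _ _).mp hc)), if_neg hcond]
    have hshift := pvLoopA_shift a (b :: c :: t) 0 (t.length : Int) (le_refl 0)
    norm_num at hshift
    rw [show (0 : Int) + 1 = 1 from by norm_num, hshift]

theorem pvLoopA_win (t : List Char) : ∀ a b c : Char,
    pvLoopA (a :: b :: c :: t) (PySem.List.pyRange 0 ((t.length : Int) + 1) 1) =
      pvChk (a :: b :: c :: t) := by
  induction t with
  | nil =>
    intro a b c
    rw [pvLoopA_step]
    simp only [List.length_nil, Nat.cast_zero, PySem.List.pyRange_one_eq_nil (le_refl (0 : Int))]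
    by_cases hcond : pvVowA a = pvVowA b ∧ pvVowA b = pvVowA c
    · rw [if_pos hcond]; simp [pvChk, hcond]
    · rw [if_neg hcond]; simp [pvChk, pvLoopA, hcond]
  | cons d t' ih =>
    intro a b c
    rw [pvLoopA_step]
    have hcast : ((d :: t').length : Int) = (t'.length : Int) + 1 := by simp
    by_cases hcond : pvVowA a = pvVowA b ∧ pvVowA b = pvVowA c
    · rw [if_pos hcond]; simp [pvChk, hcond]
    · rw [if_neg hcond, hcast, ih b c d]
      simp [pvChk, hcond]

theorem pvLoopA_eq_chk (cs : List Char) (h3 : 3 ≤ cs.length) :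
    pvLoopA cs (PySem.List.pyRange 0 ((cs.length : Int) - 2) 1) = pvChk cs := by
  match cs, h3 with
  | a :: b :: c :: t, _ =>
    have hlen : ((a :: b :: c :: t).length : Int) - 2 = (t.length : Int) + 1 := by
      simp; ring
    rw [hlen]
    exact pvLoopA_win t a b c

theorem pvChk_short (cs : List Char) (h : cs.length < 3) : pvChk cs = true := by
  match cs, h with
  | [], _ => rfl
  | [a], _ => rfl
  | [a, b], _ => rfl

theorem check_3vowel_3con_eq_chk (s : String) : check_3vowel_3con s = pvChk s.toList := by
  simp only [check_3vowel_3con]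
  split_ifs with h1 h2 h3
  · exact (pvChk_short s.toList h1).symm
  all_goals try {
    have hlen : ((s.toList.length : Int) - 2) = 1 := by rw [h2]; norm_num
    have h01 : PySem.List.pyRange 0 1 1 = [0] := by decide
    have hA := pvLoopA_eq_chk s.toList (by omega)
    rw [hlen, h01] at hA
    simp only [pvLoopA] at hA
    first
      | (rw [if_pos h3] at hA; exact hA)
      | (rw [if_neg h3] at hA; exact hA) }
  exact pvLoopA_eq_chk s.toList (by omega)

-- ===== VERDICT (by name: the statement is the Claim_ definition above) =====
theorem check_3vowel_3con_spec : Claim_equal_check_3vowel_3con := by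
  intro s _
  unfold Spec_check_3vowel_3con check_3vowel_3con_alt
  rw [alt_eq_chk, check_3vowel_3con_eq_chk]
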